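-- pv_equiv track=rewrite | github.com/MS-101/PKS-Zadanie1 | main.py | transform_frame
-- ===== SOURCE A (Python) =====
-- def transform_bytes(old_string):
--     new_string = ""
--     i = 0
--
--     for char in old_string:
--         if i % 2 == 0 and i != 0:
--             new_string += " "
--
--         new_string += char
--         i += 1
--
--     return new_string
--
-- def transform_frame(old_string):
--     string_list = []
--     new_string = ""
--     i = 0
--
--     for char in old_string:
--         if i % 32 == 0 and i != 0:
--             string_list.append(transform_bytes(new_string))
--             new_string = ""
--
--         new_string += char
--         i += 1
--
--     if new_string != "":
--         string_list.append(transform_bytes(new_string))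
--
--     return string_list
-- ===== SOURCE B (Python) =====
-- def transform_frame(old_string):
--     blocks = [old_string[i:i + 32] for i in range(0, len(old_string), 32)]
--     return [" ".join(b[j:j + 2] for j in range(0, len(b), 2)) for b in blocks]
-- ===== Notes on version B (the rewrite author's own statement) =====
-- stated objective: simpler
-- what changed: Replaces the two counter-driven character loops with mutable string accumulation by slicing comprehensions: 32-char blocks via range-step slicing, and spaces inserted by joining 2-char slices.
import Mathlib
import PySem

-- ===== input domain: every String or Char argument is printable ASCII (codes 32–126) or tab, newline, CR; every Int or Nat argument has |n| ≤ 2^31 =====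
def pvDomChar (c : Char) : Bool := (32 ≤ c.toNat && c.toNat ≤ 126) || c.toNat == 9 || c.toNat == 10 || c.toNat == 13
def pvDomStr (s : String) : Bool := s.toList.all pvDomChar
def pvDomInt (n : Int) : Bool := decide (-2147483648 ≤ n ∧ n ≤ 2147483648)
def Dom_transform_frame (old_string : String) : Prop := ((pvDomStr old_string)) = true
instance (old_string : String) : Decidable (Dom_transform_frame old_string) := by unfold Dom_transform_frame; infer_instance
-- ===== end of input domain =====

-- B replaces A's two counter-driven accumulation loops by slicing comprehensions (simpler decomposition).

-- ===== PORT A =====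
-- transform_bytes' character loop, on the character list (new_string as List Char, i the char counter)
def tbChars (cs : List Char) : List Char :=
  (cs.foldl
    (fun (p : List Char × Nat) char =>
      ((if p.2 % 2 == 0 && p.2 != 0 then p.1 ++ [' '] else p.1) ++ [char], p.2 + 1))
    ([], 0)).1

def transform_bytes (old_string : String) : String :=
  String.ofList (tbChars old_string.toList)

-- one iteration of the frame loop's body
def frameStep (p : List String × List Char × Nat) (char : Char) : List String × List Char × Nat :=
  let q := if p.2.2 % 32 == 0 && p.2.2 != 0
           then (p.1 ++ [transform_bytes (String.ofList p.2.1)], ([] : List Char))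
           else (p.1, p.2.1)
  (q.1, q.2 ++ [char], p.2.2 + 1)

-- the trailing 'if new_string != "": string_list.append(...)'
def frameFinish (st : List String × List Char × Nat) : List String :=
  if st.2.1 ≠ [] then st.1 ++ [transform_bytes (String.ofList st.2.1)] else st.1

def transform_frame (old_string : String) : List String :=
  frameFinish (old_string.toList.foldl frameStep ([], [], 0))

-- ===== PORT B =====
-- " ".join(b[j:j+2] for j in range(0, len(b), 2))
def spacedAlt (b : List Char) : List Char :=
  PySem.Chars.join [' ']
    ((PySem.List.pyRange 0 (b.length : Int) 2).map
      (fun j => PySem.List.slice b (some j) (some (j + 2))))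

-- [spaced(old_string[i:i+32]) for i in range(0, len(old_string), 32)]
def transform_frame_alt (old_string : String) : List String :=
  ((PySem.List.pyRange 0 (old_string.toList.length : Int) 32).map
    (fun i => PySem.List.slice old_string.toList (some i) (some (i + 32)))).map
    (fun b => String.ofList (spacedAlt b))

-- ===== PRECONDITION & SPEC =====
def Spec_transform_frame (old_string : String) (out : List String) : Prop := out = transform_frame_alt old_string
instance (old_string : String) (out : List String) : Decidable (Spec_transform_frame old_string out) := by unfold Spec_transform_frame; infer_instance

-- ===== CLAIM (what is proved, stated in full; the proofs are below) =====
def Claim_equal_transform_frame : Prop := ∀ (old_string : String), Dom_transform_frame old_string → Spec_transform_frame old_string (transform_frame old_string)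

-- ===== LEMMAS AND PROOFS =====

-- chunks of size k (k ≥ 1), written structurally so termination is unconditional
def chunkBy (k : Nat) : List Char → List (List Char)
  | [] => []
  | c :: rest => (c :: rest.take (k - 1)) :: chunkBy k (rest.drop (k - 1))
termination_by cs => cs.length
decreasing_by simp

lemma chunkBy_nil (k : Nat) : chunkBy k [] = [] := by simp [chunkBy]

lemma chunkBy_cons (k : Nat) (hk : 1 ≤ k) (cs : List Char) (h : cs ≠ []) :
    chunkBy k cs = cs.take k :: chunkBy k (cs.drop k) := by
  cases cs with
  | nil => exact absurd rfl h
  | cons c rest =>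
      rw [chunkBy.eq_def]
      obtain ⟨k', rfl⟩ : ∃ k', k = k' + 1 := ⟨k - 1, by omega⟩
      simp

lemma chunkBy_small (k : Nat) (hk : 1 ≤ k) (cs : List Char) (h : cs ≠ []) (hlen : cs.length ≤ k) :
    chunkBy k cs = [cs] := by
  rw [chunkBy_cons k hk cs h, List.take_of_length_le hlen, List.drop_of_length_le hlen, chunkBy_nil]

-- shift lemma for pyRange with positive step
lemma pyRange_shift (a b t k : Int) (hk : 0 < k) :
    PySem.List.pyRange (a + t) (b + t) k = (PySem.List.pyRange a b k).map (· + t) := by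
  rw [PySem.List.pyRange_of_pos _ _ hk, PySem.List.pyRange_of_pos _ _ hk, List.map_map]
  have h1 : b + t - (a + t) = b - a := by ring
  rw [h1]
  simp only [add_lt_add_iff_right]
  exact List.map_congr_left (fun x _ => by simp [Function.comp]; ring)

-- cons lemma for pyRange with positive step
lemma pyRange_step_cons (a b k : Int) (hk : 0 < k) (h : a < b) :
    PySem.List.pyRange a b k = a :: PySem.List.pyRange (a + k) b k := by
  rw [PySem.List.pyRange_of_pos _ _ hk, PySem.List.pyRange_of_pos _ _ hk]
  have hceil : ∀ d : Int, 0 < d → (d + k - 1) / k = (d - 1) / k + 1 := by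
    intro d hd
    have := Int.add_mul_ediv_right (d - 1) 1 (by omega : k ≠ 0)
    have he : d - 1 + 1 * k = d + k - 1 := by ring
    rw [he] at this
    omega
  have hcount : (if a < b then ((b - a + k - 1) / k).toNat else 0)
      = (if a + k < b then ((b - (a + k) + k - 1) / k).toNat else 0) + 1 := by
    split_ifs with h1 h2
    · have e1 := hceil (b - a) (by omega)
      have e2 := hceil (b - (a + k)) (by omega)
      have e3 : b - (a + k) - 1 = b - a - 1 - k := by ring
      rw [e3] at e2
      have e4 := Int.add_mul_ediv_right (b - a - 1 - k) 1 (by omega : k ≠ 0)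
      have e5 : b - a - 1 - k + 1 * k = b - a - 1 := by ring
      rw [e5] at e4
      have hq : 0 ≤ (b - a - 1 - k) / k := Int.ediv_nonneg (by omega) (by omega)
      omega
    · have e1 := hceil (b - a) (by omega)
      have e0 : (b - a - 1) / k = 0 := Int.ediv_eq_zero_of_lt (by omega) (by omega)
      omega
  rw [hcount, List.range_succ_eq_map]
  simp only [List.map_cons, List.map_map, Nat.cast_zero, mul_zero, add_zero, List.cons.injEq,
    true_and]
  exact List.map_congr_left (fun x _ => by simp [Function.comp]; ring)

-- the slicing comprehension computes chunkBy
lemma slice_comprehension (k : Nat) (hk : 1 ≤ k) :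
    ∀ (n : Nat) (cs : List Char), cs.length ≤ n →
    (PySem.List.pyRange 0 (cs.length : Int) (k : Int)).map
      (fun i => PySem.List.slice cs (some i) (some (i + (k : Int)))) = chunkBy k cs := by
  have hkpos : (0:Int) < (k:Int) := by exact_mod_cast hk
  intro n
  induction n with
  | zero =>
      intro cs hcs
      have : cs = [] := by cases cs <;> simp_all
      subst this
      simp [PySem.List.pyRange_of_pos 0 0 hkpos, chunkBy_nil]
  | succ m ih =>
      intro cs hcs
      by_cases hne : cs = []
      · subst hne
        simp [PySem.List.pyRange_of_pos 0 0 hkpos, chunkBy_nil]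
      · have hpos : 0 < cs.length := List.length_pos_iff.mpr hne
        have hlen : (0:Int) < (cs.length : Int) := by exact_mod_cast hpos
        rw [pyRange_step_cons 0 _ _ hkpos hlen, List.map_cons]
        have hshift : PySem.List.pyRange (0 + (k:Int)) ((cs.length : Int)) (k:Int)
            = (PySem.List.pyRange 0 ((cs.length : Int) - k) (k:Int)).map (· + (k:Int)) := by
          have := pyRange_shift 0 ((cs.length : Int) - k) (k:Int) (k:Int) hkpos
          simpa using this
        rw [hshift, List.map_map]
        -- head slice: cs[0:k] = take k
        have hhead : PySem.List.slice cs (some 0) (some (0 + (k:Int))) = cs.take k := by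
          rw [PySem.List.slice_toNat _ le_rfl (by omega)]
          simp
        -- tail: reindex onto drop k
        have htail : ((PySem.List.pyRange 0 ((cs.length : Int) - k) (k:Int)).map
              ((fun i => PySem.List.slice cs (some i) (some (i + (k:Int)))) ∘ (· + (k:Int))))
            = (PySem.List.pyRange 0 (((cs.drop k).length : Int)) (k:Int)).map
              (fun i => PySem.List.slice (cs.drop k) (some i) (some (i + (k:Int)))) := by
          by_cases hle : k ≤ cs.length
          · have hlq : (((cs.drop k).length : Nat) : Int) = (cs.length : Int) - k := by
              rw [List.length_drop]; omega
            rw [hlq]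
            apply List.map_congr_left
            intro i hi
            have hi0 : 0 ≤ i := by
              have := ((PySem.List.mem_pyRange_iff_of_pos hkpos) i).mp hi
              omega
            simp only [Function.comp]
            rw [PySem.List.slice_toNat _ (by omega) (by omega),
                PySem.List.slice_toNat _ (by omega) (by omega), List.drop_drop]
            congr 1
            · omega
            · congr 1
              omega
          · have hd : cs.drop k = [] := List.drop_eq_nil_of_le (by omega)
            have hnlt : ¬ ((0:Int) < (cs.length : Int) - k) := by omega
            have h1 : PySem.List.pyRange 0 ((cs.length : Int) - k) (k:Int) = [] := by
              rw [PySem.List.pyRange_of_pos _ _ hkpos, if_neg hnlt]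
              simp
            have h2 : PySem.List.pyRange 0 (((cs.drop k).length : Nat) : Int) (k:Int) = [] := by
              rw [hd, PySem.List.pyRange_of_pos _ _ hkpos,
                  if_neg (by simp : ¬ ((0:Int) < ((([] : List Char).length : Nat) : Int)))]
              simp
            rw [h1, h2]
            simp
        rw [htail, ih (cs.drop k) (by rw [List.length_drop]; omega),
            chunkBy_cons k hk cs hne, hhead]

-- join of 2-chunks, the value B's inner comprehension computes
def jn (cs : List Char) : List Char := PySem.Chars.join [' '] (chunkBy 2 cs)

lemma jn_single (a : Char) : jn [a] = [a] := by
  unfold jn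
  rw [chunkBy.eq_def]
  simp [chunkBy_nil, PySem.Chars.join_singleton]

lemma jn_cons2 (a b : Char) (r : List Char) :
    jn (a :: b :: r) = a :: b :: (if r = [] then [] else ' ' :: jn r) := by
  have h2 : ∀ (y z : Char) (q : List Char), chunkBy 2 (y :: z :: q) = [y, z] :: chunkBy 2 q := by
    intro y z q
    rw [chunkBy.eq_def]
    simp
  unfold jn
  rw [h2]
  cases r with
  | nil => simp [chunkBy_nil, PySem.Chars.join_singleton]
  | cons x xs =>
      rw [chunkBy_cons 2 (by omega) (x :: xs) (by simp), PySem.Chars.join_cons_cons,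
          ← chunkBy_cons 2 (by omega) (x :: xs) (by simp)]
      simp

-- transform_bytes' loop, after the first two characters (counter even and nonzero)
lemma tb_loop (n : Nat) : ∀ (cs ns : List Char) (i : Nat), cs.length ≤ n → i ≠ 0 → i % 2 = 0 →
    (cs.foldl
      (fun (p : List Char × Nat) char =>
        ((if p.2 % 2 == 0 && p.2 != 0 then p.1 ++ [' '] else p.1) ++ [char], p.2 + 1))
      (ns, i)).1 = ns ++ (if cs = [] then [] else ' ' :: jn cs) := by
  induction n with
  | zero =>
      intro cs ns i hlen _ _
      have : cs = [] := by cases cs <;> simp_all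
      subst this; simp
  | succ m ih =>
      intro cs ns i hlen hi0 hi2
      cases cs with
      | nil => simp
      | cons a t =>
        have hc1 : (i % 2 == 0 && i != 0) = true := by simp [hi2]; omega
        cases t with
        | nil =>
            simp [List.foldl, hc1, jn_single]
        | cons b r =>
          simp only [List.foldl, hc1, if_true]
          have hc2' : (¬ ((i + 1) % 2 == 0 && (i + 1) != 0) = true) := by simp; omega
          rw [if_neg hc2']
          rw [ih r (ns ++ [' '] ++ [a] ++ [b]) (i + 2) (by simp at hlen ⊢; omega) (by omega) (by omega)]
          rw [jn_cons2]
          cases r <;> simp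

lemma tb_eq (cs : List Char) : tbChars cs = jn cs := by
  unfold tbChars
  cases cs with
  | nil => simp [jn, chunkBy_nil, PySem.Chars.join_nil]
  | cons a t =>
    cases t with
    | nil => simp [List.foldl, jn_single]
    | cons b r =>
      have h1 : ((0:Nat) % 2 == 0 && (0:Nat) != 0) = false := by decide
      have h2 : ((1:Nat) % 2 == 0 && (1:Nat) != 0) = false := by decide
      simp only [List.foldl, h1, h2, Bool.false_eq_true, if_false]
      rw [tb_loop r.length r ([] ++ [a] ++ [b]) 2 le_rfl (by omega) (by omega)]
      rw [jn_cons2]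
      cases r <;> simp

-- the frame loop of A computes chunkBy 32, invariant on the counter
lemma frame_loop (cs : List Char) : ∀ (sl : List String) (ns : List Char) (i : Nat),
    ns.length = (if i = 0 then 0 else (i - 1) % 32 + 1) →
    frameFinish (cs.foldl frameStep (sl, ns, i))
    = sl ++ (chunkBy 32 (ns ++ cs)).map (fun b => transform_bytes (String.ofList b)) := by
  induction cs with
  | nil =>
      intro sl ns i hinv
      simp only [List.foldl, List.append_nil]
      by_cases hns : ns = []
      · subst hns; simp [chunkBy_nil, frameFinish]
      · have hlen : ns.length ≤ 32 := by
          rw [hinv]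
          by_cases h0 : i = 0 <;> simp [h0] <;> omega
        rw [chunkBy_small 32 (by omega) ns hns hlen]
        simp [frameFinish, hns]
  | cons a t ih =>
      intro sl ns i hinv
      by_cases hcond : (i % 32 == 0 && i != 0) = true
      · -- flush: under the invariant this means ns has exactly 32 chars
        have hi : i % 32 = 0 ∧ i ≠ 0 := by simpa using hcond
        have hns32 : ns.length = 32 := by
          rw [hinv, if_neg hi.2]
          omega
        have hstep : frameStep (sl, ns, i) a
            = (sl ++ [transform_bytes (String.ofList ns)], [] ++ [a], i + 1) := by
          simp [frameStep, hcond]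
        rw [List.foldl_cons, hstep,
          ih (sl ++ [transform_bytes (String.ofList ns)]) ([] ++ [a]) (i + 1)
            (by simp; omega)]
        rw [chunkBy_cons 32 (by omega) (ns ++ a :: t) (by simp),
            List.take_append_of_le_length (by omega), List.drop_append_of_le_length (by omega)]
        simp [List.take_of_length_le (le_of_eq hns32), List.drop_of_length_le (le_of_eq hns32)]
      · have hi : ¬ (i % 32 = 0 ∧ i ≠ 0) := by simpa using hcond
        have hlt : ns.length < 32 := by
          rw [hinv]
          by_cases h0 : i = 0
          · simp [h0]
          · have hm : i % 32 ≠ 0 := fun hmod => hi ⟨hmod, h0⟩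
            simp only [if_neg h0]
            omega
        have hstep : frameStep (sl, ns, i) a = (sl, ns ++ [a], i + 1) := by
          simp only [frameStep, hcond, Bool.false_eq_true, if_false]
        rw [List.foldl_cons, hstep,
          ih sl (ns ++ [a]) (i + 1)
            (by
              simp only [List.length_append, List.length_cons, List.length_nil]
              rw [hinv]
              by_cases h0 : i = 0
              · simp [h0]
              · have hm : i % 32 ≠ 0 := fun hmod => hi ⟨hmod, h0⟩
                simp only [if_neg h0, if_neg (by omega : ¬ i + 1 = 0)]
                omega)]
        simp

-- B's per-block formatter equals jn
lemma spacedAlt_eq (b : List Char) : spacedAlt b = jn b := by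
  unfold spacedAlt jn
  rw [show ((2:Int)) = ((2:Nat):Int) by norm_num]
  rw [slice_comprehension 2 (by omega) b.length b le_rfl]

-- ===== VERDICT (by name: the statement is the Claim_ definition above) =====
theorem transform_frame_spec : Claim_equal_transform_frame := by
  intro s _
  unfold Spec_transform_frame transform_frame transform_frame_alt
  rw [show ((32:Int)) = ((32:Nat):Int) by norm_num]
  rw [slice_comprehension 32 (by omega) s.toList.length s.toList le_rfl]
  rw [frame_loop s.toList [] [] 0 (by simp)]
  simp only [List.nil_append]
  apply List.map_congr_left
  intro b _
  simp [transform_bytes, tb_eq b, spacedAlt_eq b]
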